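-- pv_equiv track=rewrite | github.com/quimey/hashcode2020 | online/matching.py | count
-- ===== SOURCE A (Python) =====
-- def count(d, bs, libraries, solution):
--     result = []
--     signup = 0
--     scanned = set()
--     for idx, books in solution:
--         current = []
--         t, m, _= libraries[idx]
--         # it takes t days to signup
--         signup += t
--         result.append((idx, m * max(0, d - signup)))
--     return result
-- ===== SOURCE B (Python) =====
-- def count(d, bs, libraries, solution):
--     # total signup time of the whole plan
--     total = sum(libraries[idx][0] for idx, _ in solution)
--     # walk the plan in reverse: emit score at the current total, then
--     # subtract this library's signup time (suffix subtraction)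
--     out = []
--     for idx, _ in reversed(solution):
--         out.append((idx, libraries[idx][1] * max(0, d - total)))
--         total -= libraries[idx][0]
--     out.reverse()
--     return out
-- ===== Notes on version B (the rewrite author's own statement) =====
-- stated objective: alternative
-- what changed: Replaces A's forward accumulate-and-append loop by a reverse traversal: one pass sums all signup times, then the solution is walked back-to-front emitting each score from the running total while subtracting suffix signup times, and the output is reversed at the end.
import Mathlib
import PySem

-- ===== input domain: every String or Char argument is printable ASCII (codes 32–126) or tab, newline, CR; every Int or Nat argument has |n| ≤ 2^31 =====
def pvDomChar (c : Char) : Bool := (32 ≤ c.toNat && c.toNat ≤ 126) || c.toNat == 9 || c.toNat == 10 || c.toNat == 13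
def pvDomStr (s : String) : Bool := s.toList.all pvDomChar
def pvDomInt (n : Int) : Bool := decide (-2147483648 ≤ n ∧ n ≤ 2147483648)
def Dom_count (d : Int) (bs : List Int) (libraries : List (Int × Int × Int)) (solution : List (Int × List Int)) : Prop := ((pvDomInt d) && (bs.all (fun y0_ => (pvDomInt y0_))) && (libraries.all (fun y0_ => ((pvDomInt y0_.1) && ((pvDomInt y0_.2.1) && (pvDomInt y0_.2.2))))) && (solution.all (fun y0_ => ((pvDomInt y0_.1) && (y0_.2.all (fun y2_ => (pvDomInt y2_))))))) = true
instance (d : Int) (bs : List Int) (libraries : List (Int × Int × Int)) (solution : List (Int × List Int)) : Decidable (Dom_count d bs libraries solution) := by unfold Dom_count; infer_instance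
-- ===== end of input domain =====

-- B replaces A's forward accumulate-and-append loop by a total-sum pass plus a reverse
-- traversal with suffix subtraction, building the output back-to-front (alternative, same cost).

-- ===== PORT A =====
-- fold state: (result, signup); libraries[idx] via pyGet? (none = IndexError, excluded by Pre_)
def count (d : Int) (bs : List Int) (libraries : List (Int × Int × Int)) (solution : List (Int × List Int)) : List (Int × Int) :=
  (solution.foldl (fun (st : List (Int × Int) × Int) p =>
      match PySem.List.pyGet? libraries p.1 with
      | some (t, m, _) =>
          let signup := st.2 + t
          (st.1 ++ [(p.1, m * max 0 (d - signup))], signup)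
      | none => st) ([], 0)).1

-- ===== PORT B =====
-- pass 1: total = sum of all signup times; pass 2: reverse walk emitting scores while
-- subtracting each signup time; finally reverse the built list
def count_alt (d : Int) (bs : List Int) (libraries : List (Int × Int × Int)) (solution : List (Int × List Int)) : List (Int × Int) :=
  let total := solution.foldl (fun (s : Int) p =>
      s + ((PySem.List.pyGet? libraries p.1).map (fun l => l.1)).getD 0) 0
  let out := solution.reverse.foldl (fun (st : List (Int × Int) × Int) p =>
      (st.1 ++ [(p.1, ((PySem.List.pyGet? libraries p.1).map (fun l => l.2.1)).getD 0 * max 0 (d - st.2))],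
       st.2 - ((PySem.List.pyGet? libraries p.1).map (fun l => l.1)).getD 0)) ([], total)
  out.1.reverse

-- ===== PRECONDITION & SPEC =====
-- Pre_ excludes exactly the inputs where A raises IndexError (an index in solution outside libraries).
def Pre_count (d : Int) (bs : List Int) (libraries : List (Int × Int × Int)) (solution : List (Int × List Int)) : Prop :=
  ∀ p ∈ solution, PySem.Raise.InRange libraries.length p.1
instance (d : Int) (bs : List Int) (libraries : List (Int × Int × Int)) (solution : List (Int × List Int)) : Decidable (Pre_count d bs libraries solution) := by unfold Pre_count; infer_instance
def pvWitness_count : Int × List Int × (List (Int × Int × Int)) × (List (Int × List Int)) :=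
  (5, [3], [(1, 2, 0), (2, 1, 0)], [(0, [1]), (1, [])])
def Spec_count (d : Int) (bs : List Int) (libraries : List (Int × Int × Int)) (solution : List (Int × List Int)) (out : List (Int × Int)) : Prop := out = count_alt d bs libraries solution
instance (d : Int) (bs : List Int) (libraries : List (Int × Int × Int)) (solution : List (Int × List Int)) (out : List (Int × Int)) : Decidable (Spec_count d bs libraries solution out) := by unfold Spec_count; infer_instance

-- ===== CLAIM (what is proved, stated in full; the proofs are below) =====
def Claim_equal_count : Prop := ∀ (d : Int) (bs : List Int) (libraries : List (Int × Int × Int)) (solution : List (Int × List Int)), Dom_count d bs libraries solution → Pre_count d bs libraries solution → Spec_count d bs libraries solution (count d bs libraries solution)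

-- ===== LEMMAS AND PROOFS =====

-- direct recursive description of A's loop, starting from signup s
def pvSpecA (d : Int) (libraries : List (Int × Int × Int)) (s : Int) : List (Int × List Int) → List (Int × Int)
  | [] => []
  | p :: rest =>
    match PySem.List.pyGet? libraries p.1 with
    | some (t, m, _) => (p.1, m * max 0 (d - (s + t))) :: pvSpecA d libraries (s + t) rest
    | none => pvSpecA d libraries s rest

-- total signup time of a solution suffix
def pvT (libraries : List (Int × Int × Int)) : List (Int × List Int) → Int
  | [] => 0
  | p :: rest => ((PySem.List.pyGet? libraries p.1).map (fun l => l.1)).getD 0 + pvT libraries rest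

theorem pvFoldA_eq (d : Int) (libraries : List (Int × Int × Int)) :
    ∀ (sol : List (Int × List Int)) (acc : List (Int × Int)) (s : Int),
      (sol.foldl (fun (st : List (Int × Int) × Int) p =>
        match PySem.List.pyGet? libraries p.1 with
        | some (t, m, _) =>
            let signup := st.2 + t
            (st.1 ++ [(p.1, m * max 0 (d - signup))], signup)
        | none => st) (acc, s)).1
      = acc ++ pvSpecA d libraries s sol := by
  intro sol
  induction sol with
  | nil => intro acc s; simp [pvSpecA]
  | cons p rest ih =>
    intro acc s
    simp only [List.foldl_cons, pvSpecA]
    cases h : PySem.List.pyGet? libraries p.1 with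
    | none => simp [ih]
    | some v =>
      obtain ⟨t, m, u⟩ := v
      simp [ih]

theorem pvSum_eq (libraries : List (Int × Int × Int)) :
    ∀ (sol : List (Int × List Int)) (a : Int),
      sol.foldl (fun (s : Int) p =>
        s + ((PySem.List.pyGet? libraries p.1).map (fun l => l.1)).getD 0) a
      = a + pvT libraries sol := by
  intro sol
  induction sol with
  | nil => intro a; simp [pvT]
  | cons p rest ih =>
    intro a
    simp only [List.foldl_cons, pvT, ih]
    ring

-- B's reverse fold, started at s + total of sol, produces the reverse of A's list and ends at s
theorem pvFoldB_eq (d : Int) (libraries : List (Int × Int × Int)) :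
    ∀ (sol : List (Int × List Int)) (acc : List (Int × Int)) (s : Int),
      (∀ p ∈ sol, PySem.Raise.InRange libraries.length p.1) →
      sol.reverse.foldl (fun (st : List (Int × Int) × Int) p =>
        (st.1 ++ [(p.1, ((PySem.List.pyGet? libraries p.1).map (fun l => l.2.1)).getD 0 * max 0 (d - st.2))],
         st.2 - ((PySem.List.pyGet? libraries p.1).map (fun l => l.1)).getD 0)) (acc, s + pvT libraries sol)
      = (acc ++ (pvSpecA d libraries s sol).reverse, s) := by
  intro sol
  induction sol with
  | nil => intro acc s _; simp [pvT, pvSpecA]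
  | cons p rest ih =>
    intro acc s hpre
    have hp : PySem.Raise.InRange libraries.length p.1 := hpre p (List.mem_cons_self ..)
    cases h : PySem.List.pyGet? libraries p.1 with
    | none =>
      exact absurd hp ((PySem.List.pyGet?_eq_none_iff libraries p.1).mp h)
    | some v =>
      obtain ⟨t, m, u⟩ := v
      have hT : s + pvT libraries (p :: rest) = (s + t) + pvT libraries rest := by
        simp only [pvT, h, Option.map_some, Option.getD_some]; ring
      simp only [List.reverse_cons, List.foldl_append, hT,
        ih acc (s + t) (fun q hq => hpre q (List.mem_cons_of_mem _ hq))]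
      simp [pvSpecA, h]

-- ===== VERDICT (by name: the statement is the Claim_ definition above) =====
theorem count_spec : Claim_equal_count := by
  intro d bs libraries solution _ hpre
  unfold Spec_count count count_alt
  rw [pvFoldA_eq]
  simp only [List.nil_append]
  rw [pvSum_eq]
  rw [pvFoldB_eq d libraries solution [] 0 hpre]
  simp
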